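-- pv_equiv track=rewrite | github.com/tbassetto/smart-spaces-hackathon-team-2 | backend/mazemap/get_paths.py | is_lost
-- ===== SOURCE A (Python) =====
-- def is_lost(distances):
--     closest_point = 100
--     for distance in distances:
--         if closest_point > distance:
--             closest_point = distance
--     if closest_point > 5:
--         return True
--     else:
--         return False
-- ===== SOURCE B (Python) =====
-- def is_lost(distances):
--     ordered = sorted(distances)
--     if not ordered:
--         return True
--     return ordered[0] > 5
-- ===== Notes on version B (the rewrite author's own statement) =====
-- stated objective: alternative
-- what changed: Replaces the running-minimum fold with sort-then-inspect: sort the list and test only the head (the smallest element), returning True on an empty list.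
import Mathlib
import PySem

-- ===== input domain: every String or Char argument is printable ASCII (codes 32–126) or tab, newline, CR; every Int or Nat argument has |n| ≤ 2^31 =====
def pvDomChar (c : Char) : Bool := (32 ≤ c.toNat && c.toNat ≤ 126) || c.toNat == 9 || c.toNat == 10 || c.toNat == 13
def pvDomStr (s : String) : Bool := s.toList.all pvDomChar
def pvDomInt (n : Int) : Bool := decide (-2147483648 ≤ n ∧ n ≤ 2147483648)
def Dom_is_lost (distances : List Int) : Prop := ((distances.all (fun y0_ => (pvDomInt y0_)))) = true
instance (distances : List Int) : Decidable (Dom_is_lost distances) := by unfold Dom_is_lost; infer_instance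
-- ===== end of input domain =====

-- B replaces the running-minimum fold with sort-then-inspect-head; objective: alternative (not faster).

-- ===== PORT A =====
def is_lost (distances : List Int) : Bool :=
  let closest_point := distances.foldl (fun closest_point distance =>
    if closest_point > distance then distance else closest_point) 100
  if closest_point > 5 then true else false

-- ===== PORT B =====
def is_lost_alt (distances : List Int) : Bool :=
  let ordered := PySem.List.sorted distances (fun x => x) false
  match ordered with
  | [] => true
  | m :: _ => decide (m > 5)

-- ===== PRECONDITION & SPEC =====
def Spec_is_lost (distances : List Int) (out : Bool) : Prop := out = is_lost_alt distances
instance (distances : List Int) (out : Bool) : Decidable (Spec_is_lost distances out) := by unfold Spec_is_lost; infer_instance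

-- ===== CLAIM (what is proved, stated in full; the proofs are below) =====
def Claim_equal_is_lost : Prop := ∀ (distances : List Int), Dom_is_lost distances → Spec_is_lost distances (is_lost distances)

-- ===== LEMMAS AND PROOFS =====

-- The running minimum exceeds 5 iff the seed does and every element does.
theorem pv_foldl_min_gt (l : List Int) : ∀ (acc : Int),
    ((l.foldl (fun c d => if c > d then d else c) acc) > 5 ↔ acc > 5 ∧ ∀ d ∈ l, d > 5) := by
  induction l with
  | nil => intro acc; simp
  | cons x xs ih =>
    intro acc
    simp only [List.foldl_cons, List.mem_cons]
    rw [ih (if acc > x then x else acc)]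
    constructor
    · rintro ⟨h1, h2⟩
      split_ifs at h1 with h <;>
        exact ⟨by omega, fun d hd => by rcases hd with rfl | hd; omega; exact h2 d hd⟩
    · rintro ⟨h1, h2⟩
      have hx := h2 x (Or.inl rfl)
      exact ⟨by split_ifs <;> omega, fun d hd => h2 d (Or.inr hd)⟩

-- The head of the sorted list exceeds 5 iff every element does.
theorem pv_alt_iff (distances : List Int) :
    is_lost_alt distances = true ↔ ∀ d ∈ distances, d > 5 := by
  unfold is_lost_alt
  cases h : PySem.List.sorted distances (fun x => x) false with
  | nil =>
    have : distances = [] := (PySem.List.sorted_eq_nil_iff _ _ _).1 h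
    subst this; simp
  | cons m t =>
    simp only [decide_eq_true_eq]
    constructor
    · intro hm d hd
      have := PySem.List.key_head_sorted_le _ _ h d hd
      simpa using lt_of_lt_of_le hm this
    · intro hall
      have hmem : m ∈ distances := by
        have : m ∈ PySem.List.sorted distances (fun x => x) false := by simp [h]
        simpa [PySem.List.mem_sorted] using this
      exact hall m hmem

-- ===== VERDICT (by name: the statement is the Claim_ definition above) =====
theorem is_lost_spec : Claim_equal_is_lost := by
  intro distances _
  simp only [Spec_is_lost, is_lost]
  split_ifs with hc
  · symm
    exact (pv_alt_iff distances).2 ((pv_foldl_min_gt distances 100).1 hc).2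
  · symm
    rw [Bool.eq_false_iff]
    intro hall
    exact hc ((pv_foldl_min_gt distances 100).2 ⟨by norm_num, (pv_alt_iff distances).1 hall⟩)
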